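-- pv_equiv track=rewrite | github.com/RobertVoropaev/MachineUnlearning | src/matcher.py | _get_rename_dict
-- ===== SOURCE A (Python) =====
-- from collections import Counter
--
-- def _get_rename_dict(old_labels, new_labels):
--     counter = Counter()
--     for new, old in zip(new_labels, old_labels):
--         counter[(new, old)] += 1
--
--     rename_dict = {}
--     for val in counter.most_common():
--         new, old= val[0]
--         if new not in rename_dict:
--             rename_dict[new] = old
--     return rename_dict
-- ===== SOURCE B (Python) =====
-- from collections import Counter
--
-- def _get_rename_dict(old_labels, new_labels):
--     counts = Counter(zip(new_labels, old_labels))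
--     best = {}  # new -> (count, old, rank of the pair in counts' insertion order)
--     for rank, ((new, old), c) in enumerate(counts.items()):
--         if new not in best or c > best[new][0]:
--             best[new] = (c, old, rank)
--     ordered = sorted(best.items(), key=lambda kv: (-kv[1][0], kv[1][2]))
--     return {new: rec[1] for new, rec in ordered}
-- ===== Notes on version B (the rewrite author's own statement) =====
-- stated objective: alternative
-- what changed: Instead of A's global most_common sort over all (new,old) pair counts followed by a first-wins filter, B makes one arg-max pass per new label over the counter's items (keeping count, old and insertion rank) and then sorts only the distinct new labels by (-count, rank), which reproduces A's stable tie-breaking exactly.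
import Mathlib
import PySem

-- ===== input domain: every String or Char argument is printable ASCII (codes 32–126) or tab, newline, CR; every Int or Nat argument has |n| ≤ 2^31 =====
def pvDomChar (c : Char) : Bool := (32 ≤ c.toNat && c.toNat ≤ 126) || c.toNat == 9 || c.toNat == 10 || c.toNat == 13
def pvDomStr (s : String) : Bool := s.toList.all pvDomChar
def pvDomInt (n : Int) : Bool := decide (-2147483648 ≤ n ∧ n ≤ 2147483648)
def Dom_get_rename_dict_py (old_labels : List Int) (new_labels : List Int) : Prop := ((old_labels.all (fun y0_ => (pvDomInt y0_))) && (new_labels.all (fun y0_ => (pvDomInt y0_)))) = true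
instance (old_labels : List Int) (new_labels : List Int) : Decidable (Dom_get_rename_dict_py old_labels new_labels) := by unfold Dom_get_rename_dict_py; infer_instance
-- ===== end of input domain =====

-- B groups by new label in one arg-max pass over the pair counter and sorts only the
-- distinct new labels by (-count, first-insertion rank), instead of A's global most_common
-- sort over all pairs followed by a first-wins filter; same cost class (alternative).
-- ===== PORT A =====
def get_rename_dict_py (old_labels : List Int) (new_labels : List Int) : List (Int × Int) :=
  let counter := (new_labels.zip old_labels).foldl
      (fun (d : PySem.Dict (Int × Int) Int) p => d.modify p 0 (· + 1)) PySem.Dict.empty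
  let mc := PySem.List.sorted counter.items (fun v => v.2) true
  let rename_dict := mc.foldl
      (fun (rd : PySem.Dict Int Int) val =>
        if rd.contains val.1.1 then rd else rd.insert val.1.1 val.1.2) PySem.Dict.empty
  rename_dict.items

-- ===== PORT B =====
def get_rename_dict_py_alt (old_labels : List Int) (new_labels : List Int) : List (Int × Int) :=
  let counts := PySem.Dict.counter (new_labels.zip old_labels)
  let best := (PySem.List.enumerate counts.items).foldl
      (fun (b : PySem.Dict Int (Int × Int × Int)) e =>
        match b.get? e.2.1.1 with
        | none => b.insert e.2.1.1 (e.2.2, e.2.1.2, e.1)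
        | some r => if r.1 < e.2.2 then b.insert e.2.1.1 (e.2.2, e.2.1.2, e.1) else b)
      PySem.Dict.empty
  let ordered := PySem.List.sorted2 best.items (fun kv => -kv.2.1) (fun kv => kv.2.2.2) false
  (ordered.foldl (fun (d : PySem.Dict Int Int) kv => d.insert kv.1 kv.2.2.1) PySem.Dict.empty).items

-- ===== PRECONDITION & SPEC =====
def Spec_get_rename_dict_py (old_labels : List Int) (new_labels : List Int) (out : List (Int × Int)) : Prop := out = get_rename_dict_py_alt old_labels new_labels
instance (old_labels : List Int) (new_labels : List Int) (out : List (Int × Int)) : Decidable (Spec_get_rename_dict_py old_labels new_labels out) := by unfold Spec_get_rename_dict_py; infer_instance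

-- ===== CLAIM (what is proved, stated in full; the proofs are below) =====
def Claim_equal_get_rename_dict_py : Prop := ∀ (old_labels : List Int) (new_labels : List Int), Dom_get_rename_dict_py old_labels new_labels → Spec_get_rename_dict_py old_labels new_labels (get_rename_dict_py old_labels new_labels)

-- ===== LEMMAS AND PROOFS =====

-- Shorthand for the element type of the counter's item list: ((new, old), count).
-- pvFW seen S : the first item of S per new-label (S-order), skipping labels in `seen`
def pvFW : List Int → List ((Int × Int) × Int) → List ((Int × Int) × Int)
  | _, [] => []
  | seen, v :: S => if v.1.1 ∈ seen then pvFW seen S else v :: pvFW (v.1.1 :: seen) S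

-- pvUpd n : what one step of B's arg-max fold does to the record stored at key n
def pvUpd (n : Int) (r? : Option (Int × Int × Int)) (e : Int × ((Int × Int) × Int)) :
    Option (Int × Int × Int) :=
  if e.2.1.1 = n then
    match r? with
    | none => some (e.2.2, e.2.1.2, e.1)
    | some r => if r.1 < e.2.2 then some (e.2.2, e.2.1.2, e.1) else some r
  else r?

-- effective strict order of A's stable count-descending sort, pos = position in the unsorted list
def pvRl (pos : (Int × Int) × Int → Nat) (a b : (Int × Int) × Int) : Prop :=
  b.2 < a.2 ∨ (a.2 = b.2 ∧ pos a < pos b)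

-- boolean comparison of B's sorted2 call (key (-count, rank))
def pvB2 (a b : Int × (Int × Int × Int)) : Bool :=
  decide ((-a.2.1) < (-b.2.1)) || (!decide ((-b.2.1) < (-a.2.1)) && decide (a.2.2.2 < b.2.2.2))

-- ---- A-side: the first-wins dict fold collects pvFW ----

lemma pvFW_congr (S : List ((Int × Int) × Int)) (seen seen' : List Int)
    (h : ∀ n, n ∈ seen ↔ n ∈ seen') : pvFW seen S = pvFW seen' S := by
  induction S generalizing seen seen' with
  | nil => rfl
  | cons v S ih =>
    by_cases hv : v.1.1 ∈ seen
    · rw [pvFW, pvFW, if_pos hv, if_pos ((h _).mp hv)]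
      exact ih seen seen' h
    · rw [pvFW, pvFW, if_neg hv, if_neg (fun hh => hv ((h _).mpr hh))]
      refine congrArg _ (ih _ _ ?_)
      intro n; simp [h n]

lemma pvContains_iff {v2 : Type} (d : PySem.Dict Int v2) (k : Int) :
    d.contains k = true ↔ k ∈ d.keys := by
  simp [PySem.Dict.contains, PySem.Dict.keys, List.any_eq_true, List.mem_map]

lemma pvL1 (S : List ((Int × Int) × Int)) (d : PySem.Dict Int Int) :
    (S.foldl (fun (rd : PySem.Dict Int Int) val =>
        if rd.contains val.1.1 then rd else rd.insert val.1.1 val.1.2) d).items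
      = d.items ++ (pvFW d.keys S).map (fun v => (v.1.1, v.1.2)) := by
  induction S generalizing d with
  | nil => simp [pvFW]
  | cons v S ih =>
    simp only [List.foldl_cons]
    by_cases hc : v.1.1 ∈ d.keys
    · rw [if_pos ((pvContains_iff d v.1.1).mpr hc)]
      rw [pvFW, if_pos hc]
      exact ih d
    · have hcf : d.contains v.1.1 = false := by
        rcases Bool.eq_false_or_eq_true (d.contains v.1.1) with h | h
        · exact absurd ((pvContains_iff d v.1.1).mp h) hc
        · exact h
      rw [hcf]
      simp only [Bool.false_eq_true, if_false]
      rw [ih (d.insert v.1.1 v.1.2)]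
      have hins : (d.insert v.1.1 v.1.2).items = d.items ++ [(v.1.1, v.1.2)] := by
        simp [PySem.Dict.insert, hcf]
      have hkeys : (d.insert v.1.1 v.1.2).keys = d.keys ++ [v.1.1] := by
        simp [PySem.Dict.keys, hins]
      rw [hins, hkeys, pvFW, if_neg hc]
      rw [pvFW_congr S (d.keys ++ [v.1.1]) (v.1.1 :: d.keys) (by intro n; simp; tauto)]
      simp

lemma pvFW_sublist (seen : List Int) (S : List ((Int × Int) × Int)) :
    (pvFW seen S).Sublist S := by
  induction S generalizing seen with
  | nil => simp [pvFW]
  | cons v S ih =>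
    by_cases h : v.1.1 ∈ seen
    · simp only [pvFW, if_pos h]
      exact (ih seen).trans (List.sublist_cons_self v S)
    · simp only [pvFW, if_neg h]
      exact List.Sublist.cons₂ v (ih _)

lemma pvFW_first {R : (Int × Int) × Int → (Int × Int) × Int → Prop}
    (S : List ((Int × Int) × Int)) (seen : List Int) (hS : S.Pairwise R)
    {v : (Int × Int) × Int} (hv : v ∈ pvFW seen S) :
    v ∈ S ∧ v.1.1 ∉ seen ∧ ∀ w ∈ S, w.1.1 = v.1.1 → w = v ∨ R v w := by
  induction S generalizing seen with
  | nil => simp [pvFW] at hv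
  | cons u S ih =>
    rcases List.pairwise_cons.mp hS with ⟨hu, hS'⟩
    by_cases h : u.1.1 ∈ seen
    · simp only [pvFW, if_pos h] at hv
      obtain ⟨h1, h2, h3⟩ := ih seen hS' hv
      refine ⟨List.mem_cons_of_mem _ h1, h2, ?_⟩
      intro w hw hwv
      rcases List.mem_cons.mp hw with rfl | hw'
      · exact absurd (hwv ▸ h) h2
      · exact h3 w hw' hwv
    · simp only [pvFW, if_neg h] at hv
      rcases List.mem_cons.mp hv with rfl | hv'
      · refine ⟨List.mem_cons_self, h, ?_⟩
        intro w hw hwv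
        rcases List.mem_cons.mp hw with rfl | hw'
        · exact Or.inl rfl
        · exact Or.inr (hu w hw')
      · obtain ⟨h1, h2, h3⟩ := ih (u.1.1 :: seen) hS' hv'
        have hvu : v.1.1 ≠ u.1.1 := fun hh => h2 (List.mem_cons.mpr (Or.inl hh))
        refine ⟨List.mem_cons_of_mem _ h1, fun hh => h2 (List.mem_cons_of_mem _ hh), ?_⟩
        intro w hw hwv
        rcases List.mem_cons.mp hw with rfl | hw'
        · exact absurd hwv (by simpa using hvu.symm)
        · exact h3 w hw' hwv

lemma pvFW_cover (S : List ((Int × Int) × Int)) (seen : List Int) (n : Int)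
    (hn : n ∉ seen) (hex : ∃ w ∈ S, w.1.1 = n) : ∃ v ∈ pvFW seen S, v.1.1 = n := by
  induction S generalizing seen with
  | nil => simp at hex
  | cons u S ih =>
    by_cases h : u.1.1 ∈ seen
    · simp only [pvFW, if_pos h]
      apply ih seen hn
      obtain ⟨w, hw, hwn⟩ := hex
      rcases List.mem_cons.mp hw with rfl | hw'
      · exact absurd (hwn ▸ h) hn
      · exact ⟨w, hw', hwn⟩
    · simp only [pvFW, if_neg h]
      by_cases hun : u.1.1 = n
      · exact ⟨u, List.mem_cons_self, hun⟩
      · have hn' : n ∉ u.1.1 :: seen := by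
          intro hh; rcases List.mem_cons.mp hh with rfl | hh
          · exact hun rfl
          · exact hn hh
        obtain ⟨v, hv, hvn⟩ := ih (u.1.1 :: seen) hn' (by
          obtain ⟨w, hw, hwn⟩ := hex
          rcases List.mem_cons.mp hw with rfl | hw'
          · exact absurd hwn hun
          · exact ⟨w, hw', hwn⟩)
        exact ⟨v, List.mem_cons_of_mem _ hv, hvn⟩

lemma pvFW_nodup (S : List ((Int × Int) × Int)) (seen : List Int) :
    ((pvFW seen S).map (fun v => v.1.1)).Nodup := by
  have key : ∀ (S : List ((Int × Int) × Int)) (seen : List Int),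
      ((pvFW seen S).map (fun v => v.1.1)).Nodup ∧ ∀ v ∈ pvFW seen S, v.1.1 ∉ seen := by
    intro S
    induction S with
    | nil => intro seen; simp [pvFW]
    | cons u S ih =>
      intro seen
      by_cases h : u.1.1 ∈ seen
      · simpa only [pvFW, if_pos h] using ih seen
      · obtain ⟨ih1, ih2⟩ := ih (u.1.1 :: seen)
        simp only [pvFW, if_neg h, List.map_cons, List.nodup_cons]
        refine ⟨⟨?_, ih1⟩, ?_⟩
        · intro hh
          obtain ⟨v, hv, hveq⟩ := List.mem_map.mp hh
          exact ih2 v hv (by simp [hveq])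
        · intro v hv
          rcases List.mem_cons.mp hv with rfl | hv'
          · exact h
          · exact fun hh => ih2 v hv' (List.mem_cons_of_mem _ hh)
  exact (key S seen).1

-- ---- stability of the insertion sort by count, reverse=True ----

lemma pvInsert_stable (pos : (Int × Int) × Int → Nat) (x : (Int × Int) × Int)
    (acc : List ((Int × Int) × Int)) (hacc : acc.Pairwise (pvRl pos))
    (hpos : ∀ y ∈ acc, pos y < pos x) :
    (PySem.List.insertBy (fun a b => decide (b.2 < a.2)) x acc).Pairwise (pvRl pos) := by
  induction acc with
  | nil => simp [PySem.List.insertBy]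
  | cons y ys ih =>
    rcases List.pairwise_cons.mp hacc with ⟨hy, hys⟩
    simp only [PySem.List.insertBy]
    by_cases h : y.2 < x.2
    · simp only [decide_eq_true_eq, if_pos h]
      refine List.pairwise_cons.mpr ⟨?_, hacc⟩
      intro z hz
      rcases List.mem_cons.mp hz with rfl | hz'
      · exact Or.inl h
      · left
        rcases hy z hz' with h1 | ⟨h1, _⟩
        · omega
        · omega
    · simp only [decide_eq_true_eq, if_neg h]
      refine List.pairwise_cons.mpr ⟨?_, ih hys (fun z hz => hpos z (List.mem_cons_of_mem _ hz))⟩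
      intro w hw
      rcases (PySem.List.mem_insertBy _ x w ys).mp hw with rfl | hw2
      · rcases lt_or_eq_of_le (not_lt.mp h) with h1 | h1
        · exact Or.inl h1
        · exact Or.inr ⟨h1.symm, hpos y List.mem_cons_self⟩
      · exact hy w hw2

lemma pvStable (pos : (Int × Int) × Int → Nat) (xs acc : List ((Int × Int) × Int))
    (hxs : xs.Pairwise (fun a b => pos a < pos b)) (hacc : acc.Pairwise (pvRl pos))
    (hsep : ∀ y ∈ acc, ∀ x ∈ xs, pos y < pos x) :
    (xs.foldl (fun acc x => PySem.List.insertBy (fun a b => decide (b.2 < a.2)) x acc) acc).Pairwise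
      (pvRl pos) := by
  induction xs generalizing acc with
  | nil => exact hacc
  | cons x xs ih =>
    rcases List.pairwise_cons.mp hxs with ⟨hx, hxs2⟩
    simp only [List.foldl_cons]
    refine ih _ hxs2 (pvInsert_stable pos x acc hacc
      (fun y hy => hsep y hy x List.mem_cons_self)) ?_
    intro y hy z hz
    rcases (PySem.List.mem_insertBy _ x y acc).mp hy with rfl | hy2
    · exact hx z hz
    · exact hsep y hy2 z (List.mem_cons_of_mem _ hz)

-- ---- generic facts about insertion sort with a boolean comparison ----

lemma pvInsert_weak {α : Type} (before : α → α → Bool)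
    (htrans : ∀ a b c, before a b = true → before b c = true → before a c = true)
    (hasym : ∀ a b, before a b = true → before b a = true → False)
    (x : α) (acc : List α) (hacc : acc.Pairwise (fun a b => before b a = false)) :
    (PySem.List.insertBy before x acc).Pairwise (fun a b => before b a = false) := by
  induction acc with
  | nil => simp [PySem.List.insertBy]
  | cons y ys ih =>
    rcases List.pairwise_cons.mp hacc with ⟨hy, hys⟩
    simp only [PySem.List.insertBy]
    by_cases h : before x y = true
    · simp only [if_pos h]
      refine List.pairwise_cons.mpr ⟨?_, hacc⟩
      intro z hz
      rcases List.mem_cons.mp hz with rfl | hz2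
      · rcases Bool.eq_false_or_eq_true (before z x) with h1 | h1
        · exact absurd (hasym _ _ h1 h) (fun hh => hh)
        · exact h1
      · rcases Bool.eq_false_or_eq_true (before z x) with h1 | h1
        · exact absurd (htrans _ _ _ h1 h) (by simp [hy z hz2])
        · exact h1
    · simp only [h, if_false, Bool.false_eq_true]
      refine List.pairwise_cons.mpr ⟨?_, ih hys⟩
      intro w hw
      rcases (PySem.List.mem_insertBy _ x w ys).mp hw with rfl | hw2
      · exact Bool.eq_false_iff.mpr (fun hh => h hh)
      · exact hy w hw2

lemma pvSortWeak {α : Type} (before : α → α → Bool)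
    (htrans : ∀ a b c, before a b = true → before b c = true → before a c = true)
    (hasym : ∀ a b, before a b = true → before b a = true → False)
    (xs acc : List α) (hacc : acc.Pairwise (fun a b => before b a = false)) :
    (xs.foldl (fun acc x => PySem.List.insertBy before x acc) acc).Pairwise
      (fun a b => before b a = false) := by
  induction xs generalizing acc with
  | nil => exact hacc
  | cons x xs ih =>
    simp only [List.foldl_cons]
    exact ih _ (pvInsert_weak before htrans hasym x acc hacc)

lemma pvSortedUnique {α : Type} (before : α → α → Bool)
    (ys zs : List α) (hperm : ys.Perm zs)
    (hys : ys.Pairwise (fun a b => before a b = true))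
    (hzs : zs.Pairwise (fun a b => before b a = false)) : ys = zs := by
  induction ys generalizing zs with
  | nil =>
    cases zs with
    | nil => rfl
    | cons z zs2 => exact absurd (hperm.symm) (by simp)
  | cons y ys2 ih =>
    cases zs with
    | nil => exact absurd hperm (by simp)
    | cons z zs2 =>
      by_cases hyz : y = z
      · subst hyz
        rcases List.pairwise_cons.mp hys with ⟨_, hys2⟩
        rcases List.pairwise_cons.mp hzs with ⟨_, hzs2⟩
        rw [ih _ (hperm.cons_inv) hys2 hzs2]
      · exfalso
        have hzmem : z ∈ ys2 := by
          have h0 : z ∈ y :: ys2 := hperm.symm.subset List.mem_cons_self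
          rcases List.mem_cons.mp h0 with h | h
          · exact absurd h.symm hyz
          · exact h
        have hymem : y ∈ zs2 := by
          have h0 : y ∈ z :: zs2 := hperm.subset List.mem_cons_self
          rcases List.mem_cons.mp h0 with h | h
          · exact absurd h hyz
          · exact h
        have h1 : before y z = true := (List.pairwise_cons.mp hys).1 z hzmem
        have h2 : before y z = false := (List.pairwise_cons.mp hzs).1 y hymem
        simp [h1] at h2

-- ---- enumerate ----

lemma pvEnum_mem {α : Type} (l : List α) (s : Int) (e : Int × α) :
    e ∈ PySem.List.enumerate l s ↔ ∃ i : Nat, ∃ h : i < l.length, e = (s + i, l[i]) := by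
  induction l generalizing s with
  | nil => simp [PySem.List.enumerate]
  | cons x t ih =>
    simp only [PySem.List.enumerate, List.mem_cons, ih]
    constructor
    · rintro (rfl | ⟨i, h, rfl⟩)
      · exact ⟨0, by simp, by simp⟩
      · refine ⟨i + 1, by simpa using h, ?_⟩
        simp only [List.getElem_cons_succ]
        congr 1
        push_cast
        ring
    · rintro ⟨i, h, rfl⟩
      cases i with
      | zero => left; simp
      | succ i =>
        right
        refine ⟨i, by simpa using h, ?_⟩
        simp only [List.getElem_cons_succ]
        congr 1
        push_cast
        ring

lemma pvEnum_pairwise {α : Type} (l : List α) (s : Int) :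
    (PySem.List.enumerate l s).Pairwise (fun a b => a.1 < b.1) := by
  induction l generalizing s with
  | nil => simp [PySem.List.enumerate]
  | cons x t ih =>
    simp only [PySem.List.enumerate]
    refine List.pairwise_cons.mpr ⟨?_, ih (s + 1)⟩
    intro e he
    obtain ⟨i, h, rfl⟩ := (pvEnum_mem t (s + 1) e).mp he
    simp
    omega

-- ---- B-side: the arg-max fold, per key ----

lemma pvL10 (E : List (Int × ((Int × Int) × Int))) (b : PySem.Dict Int (Int × Int × Int)) (n : Int) :
    (E.foldl (fun (b : PySem.Dict Int (Int × Int × Int)) e =>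
        match b.get? e.2.1.1 with
        | none => b.insert e.2.1.1 (e.2.2, e.2.1.2, e.1)
        | some r => if r.1 < e.2.2 then b.insert e.2.1.1 (e.2.2, e.2.1.2, e.1) else b) b).get? n
      = E.foldl (pvUpd n) (b.get? n) := by
  induction E generalizing b with
  | nil => rfl
  | cons e E ih =>
    simp only [List.foldl_cons]
    rw [ih]
    congr 1
    by_cases hcls : e.2.1.1 = n
    · subst hcls
      unfold pvUpd
      rw [if_pos rfl]
      cases hbg : b.get? e.2.1.1 with
      | none => simp [PySem.Dict.get?_insert_self]
      | some r =>
        simp only []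
        by_cases hlt : r.1 < e.2.2
        · simp [hlt, PySem.Dict.get?_insert_self]
        · simp [hlt, hbg]
    · unfold pvUpd
      rw [if_neg hcls]
      have hne : n ≠ e.2.1.1 := fun hh => hcls hh.symm
      cases hbg : b.get? e.2.1.1 with
      | none => simp [PySem.Dict.get?_insert_of_ne _ _ hne]
      | some r =>
        simp only []
        by_cases hlt : r.1 < e.2.2
        · simp [hlt, PySem.Dict.get?_insert_of_ne _ _ hne]
        · simp [hlt]

lemma pvUpd_after (n : Int) (r : Int × Int × Int) (l : List (Int × ((Int × Int) × Int)))
    (h : ∀ e ∈ l, e.2.1.1 = n → e.2.2 ≤ r.1) : l.foldl (pvUpd n) (some r) = some r := by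
  induction l with
  | nil => rfl
  | cons e l ih =>
    simp only [List.foldl_cons]
    have hstep : pvUpd n (some r) e = some r := by
      unfold pvUpd
      by_cases hcls : e.2.1.1 = n
      · have := h e List.mem_cons_self hcls
        simp [hcls, not_lt.mpr this]
      · simp [hcls]
    rw [hstep]
    exact ih (fun e' he' hc => h e' (List.mem_cons_of_mem _ he') hc)

lemma pvUpd_small (n : Int) (c : Int) (l : List (Int × ((Int × Int) × Int)))
    (h : ∀ e ∈ l, e.2.1.1 = n → e.2.2 < c) (acc : Option (Int × Int × Int))
    (hacc : acc = none ∨ ∃ r, acc = some r ∧ r.1 < c) :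
    l.foldl (pvUpd n) acc = none ∨ ∃ r, l.foldl (pvUpd n) acc = some r ∧ r.1 < c := by
  induction l generalizing acc with
  | nil => simpa using hacc
  | cons e l ih =>
    simp only [List.foldl_cons]
    apply ih (fun e' he' hc => h e' (List.mem_cons_of_mem _ he') hc)
    rcases hacc with rfl | ⟨r, rfl, hr⟩
    · by_cases hcls : e.2.1.1 = n
      · refine Or.inr ⟨(e.2.2, e.2.1.2, e.1), ?_, h e List.mem_cons_self hcls⟩
        unfold pvUpd; simp [hcls]
      · refine Or.inl ?_
        unfold pvUpd; simp [hcls]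
    · by_cases hcls : e.2.1.1 = n
      · by_cases hlt : r.1 < e.2.2
        · refine Or.inr ⟨(e.2.2, e.2.1.2, e.1), ?_, h e List.mem_cons_self hcls⟩
          unfold pvUpd; simp [hcls, hlt]
        · refine Or.inr ⟨r, ?_, hr⟩
          unfold pvUpd; simp [hcls, hlt]
      · refine Or.inr ⟨r, ?_, hr⟩
        unfold pvUpd; simp [hcls]

lemma pvRecOf_spec (n : Int) (l : List (Int × ((Int × Int) × Int)))
    (hl : l.Pairwise (fun a b => a.1 < b.1)) (e' : Int × ((Int × Int) × Int)) (he' : e' ∈ l)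
    (hcls : e'.2.1.1 = n)
    (hdom : ∀ e ∈ l, e.2.1.1 = n → e = e' ∨ e.2.2 < e'.2.2 ∨ (e.2.2 = e'.2.2 ∧ e'.1 < e.1)) :
    l.foldl (pvUpd n) none = some (e'.2.2, e'.2.1.2, e'.1) := by
  obtain ⟨l₁, l₂, rfl⟩ := List.append_of_mem he'
  rw [List.foldl_append]
  have hpw := List.pairwise_append.mp hl
  have hl1lt : ∀ e ∈ l₁, e.1 < e'.1 := fun e he => hpw.2.2 e he e' List.mem_cons_self
  have hl2lt : ∀ e ∈ l₂, e'.1 < e.1 := fun e he => (List.pairwise_cons.mp hpw.2.1).1 e he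
  have hacc1 : l₁.foldl (pvUpd n) none = none ∨
      ∃ r, l₁.foldl (pvUpd n) none = some r ∧ r.1 < e'.2.2 := by
    apply pvUpd_small n e'.2.2 l₁ ?_ none (Or.inl rfl)
    intro e he hc
    rcases hdom e (by simp [he]) hc with rfl | hlt | ⟨_, hgt⟩
    · exact absurd (hl1lt e he) (lt_irrefl _)
    · exact hlt
    · exact absurd (hl1lt e he) (by omega)
  have hstep : pvUpd n (l₁.foldl (pvUpd n) none) e' = some (e'.2.2, e'.2.1.2, e'.1) := by
    rcases hacc1 with hnone | ⟨r, hr, hrlt⟩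
    · rw [hnone]; unfold pvUpd; simp [hcls]
    · rw [hr]; unfold pvUpd; simp [hcls, hrlt]
  rw [List.foldl_cons, hstep]
  apply pvUpd_after
  intro e he hc
  have hne : e ≠ e' := by
    intro hh
    exact absurd (hl2lt e he) (by rw [hh]; exact lt_irrefl _)
  rcases hdom e (by simp [he]) hc with rfl | hlt | ⟨heq, _⟩
  · exact absurd rfl hne
  · exact le_of_lt hlt
  · exact le_of_eq heq

lemma pvUpd_none_iff (n : Int) (l : List (Int × ((Int × Int) × Int))) :
    l.foldl (pvUpd n) none = none ↔ ∀ e ∈ l, e.2.1.1 ≠ n := by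
  have hsome : ∀ (l : List (Int × ((Int × Int) × Int))) (r : Int × Int × Int),
      ∃ r', l.foldl (pvUpd n) (some r) = some r' := by
    intro l
    induction l with
    | nil => exact fun r => ⟨r, rfl⟩
    | cons e l ih =>
      intro r
      simp only [List.foldl_cons]
      unfold pvUpd
      by_cases hcls : e.2.1.1 = n
      · by_cases hlt : r.1 < e.2.2
        · simpa [hcls, hlt] using ih _
        · simpa [hcls, hlt] using ih r
      · simpa [hcls] using ih r
  induction l with
  | nil => simp
  | cons e l ih =>
    simp only [List.foldl_cons, List.mem_cons]
    by_cases hcls : e.2.1.1 = n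
    · have h1 : pvUpd n none e = some (e.2.2, e.2.1.2, e.1) := by unfold pvUpd; simp [hcls]
      rw [h1]
      obtain ⟨r', hr'⟩ := hsome l (e.2.2, e.2.1.2, e.1)
      constructor
      · intro hh
        rw [hr'] at hh
        cases hh
      · intro hh
        exact absurd hcls (hh e (Or.inl rfl))
    · have h1 : pvUpd n none e = none := by unfold pvUpd; simp [hcls]
      rw [h1]
      constructor
      · rintro hh e' (rfl | he') hc
        · exact hcls hc
        · exact (ih.mp hh) e' he' hc
      · intro hh
        exact ih.mpr (fun e' he' hc => hh e' (Or.inr he') hc)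

-- ---- small dict facts ----

lemma pvKeys_nodup_best (E : List (Int × ((Int × Int) × Int))) :
    ((E.foldl (fun (b : PySem.Dict Int (Int × Int × Int)) e =>
        match b.get? e.2.1.1 with
        | none => b.insert e.2.1.1 (e.2.2, e.2.1.2, e.1)
        | some r => if r.1 < e.2.2 then b.insert e.2.1.1 (e.2.2, e.2.1.2, e.1) else b)
        PySem.Dict.empty).keys).Nodup := by
  have hins : ∀ (d : PySem.Dict Int (Int × Int × Int)) (k : Int) (v : Int × Int × Int),
      d.keys.Nodup → (d.insert k v).keys.Nodup := by
    intro d k v h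
    simpa using PySem.Dict.nodup_keys_foldl_insert [k] (fun _ _ => v) d h
  suffices h : ∀ (d : PySem.Dict Int (Int × Int × Int)), d.keys.Nodup →
      ((E.foldl (fun (b : PySem.Dict Int (Int × Int × Int)) e =>
        match b.get? e.2.1.1 with
        | none => b.insert e.2.1.1 (e.2.2, e.2.1.2, e.1)
        | some r => if r.1 < e.2.2 then b.insert e.2.1.1 (e.2.2, e.2.1.2, e.1) else b) d).keys).Nodup by
    exact h PySem.Dict.empty (by simp [PySem.Dict.empty, PySem.Dict.keys])
  induction E with
  | nil => exact fun d h => h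
  | cons e E ih =>
    intro d h
    simp only [List.foldl_cons]
    apply ih
    cases hbg : d.get? e.2.1.1 with
    | none => simpa using hins d _ _ h
    | some r =>
      by_cases hlt : r.1 < e.2.2
      · simpa [hlt] using hins d _ _ h
      · simpa [hlt] using h

lemma pvGet?_none_iff_keys {ν : Type} (d : PySem.Dict Int ν) (n : Int) :
    d.get? n = none ↔ n ∉ d.keys := by
  simp only [PySem.Dict.get?, PySem.Dict.keys, Option.map_eq_none_iff, List.find?_eq_none,
    List.mem_map, beq_iff_eq]
  constructor
  · intro h hh
    obtain ⟨p, hp, rfl⟩ := hh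
    exact h p hp rfl
  · intro h p hp hpk
    exact h ⟨p, hp, hpk⟩

-- ---- main theorem ----

theorem pvMain (old_labels new_labels : List Int) :
    get_rename_dict_py old_labels new_labels = get_rename_dict_py_alt old_labels new_labels := by
  -- set up the common data
  set P := new_labels.zip old_labels with hPdef
  set IA := List.map (fun k => (k, (List.count k P : Int))) (PySem.Set.ofList P) with hIAdef
  have hitems : (PySem.Dict.counter P).items = IA := PySem.Dict.items_counter P
  set S := PySem.List.sorted IA (fun v => v.2) true with hSdef
  set F := pvFW [] S with hFdef
  -- IA is nodup, hence pairwise increasing in idxOf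
  have hIAnodup : IA.Nodup := by
    rw [hIAdef]
    exact (PySem.Set.nodup_ofList P).map (fun a b h => congrArg Prod.fst h)
  have hpos : IA.Pairwise (fun a b => IA.idxOf a < IA.idxOf b) := by
    rw [List.pairwise_iff_getElem]
    intro i j hi hj hij
    rw [hIAnodup.idxOf_getElem i hi, hIAnodup.idxOf_getElem j hj]
    exact hij
  have hSpair : S.Pairwise (pvRl (fun v => IA.idxOf v)) := by
    rw [hSdef, PySem.List.sorted_rev_eq_foldl_insertBy]
    exact pvStable _ IA [] hpos (by simp) (by simp)
  have hSperm : S.Perm IA := PySem.List.sorted_perm IA _ true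
  have hFpair : F.Pairwise (pvRl (fun v => IA.idxOf v)) :=
    List.Pairwise.sublist (pvFW_sublist [] S) hSpair
  -- A-side reduction
  have hA : get_rename_dict_py old_labels new_labels = F.map (fun v => (v.1.1, v.1.2)) := by
    simp only [get_rename_dict_py]
    rw [← hPdef, ← PySem.Dict.counter_eq_foldl, hitems, ← hSdef, pvL1]
    show ([] : List (Int × Int)) ++ (pvFW [] S).map (fun v => (v.1.1, v.1.2)) = _
    rw [List.nil_append, ← hFdef]
  -- B-side data
  set E := PySem.List.enumerate IA 0 with hEdef
  set best := E.foldl (fun (b : PySem.Dict Int (Int × Int × Int)) e =>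
        match b.get? e.2.1.1 with
        | none => b.insert e.2.1.1 (e.2.2, e.2.1.2, e.1)
        | some r => if r.1 < e.2.2 then b.insert e.2.1.1 (e.2.2, e.2.1.2, e.1) else b)
      PySem.Dict.empty with hbestdef
  have hBeq : get_rename_dict_py_alt old_labels new_labels =
      ((PySem.List.sorted2 best.items (fun kv => -kv.2.1) (fun kv => kv.2.2.2) false).foldl
        (fun (d : PySem.Dict Int Int) kv => d.insert kv.1 kv.2.2.1) PySem.Dict.empty).items := by
    simp only [get_rename_dict_py_alt]
    rw [← hPdef, hitems, ← hEdef, ← hbestdef]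
  -- get? of best
  have hget : ∀ n, best.get? n = E.foldl (pvUpd n) none := by
    intro n
    rw [hbestdef]
    exact pvL10 E PySem.Dict.empty n
  have hEpw : E.Pairwise (fun a b => a.1 < b.1) := pvEnum_pairwise IA 0
  -- the winner record stored for each first-wins representative
  have hWin : ∀ v ∈ F, best.get? v.1.1 = some (v.2, v.1.2, ((IA.idxOf v : Nat) : Int)) := by
    intro v hv
    obtain ⟨hvS, -, hdom⟩ := pvFW_first S [] hSpair hv
    have hvIA : v ∈ IA := hSperm.subset hvS
    have hidx := List.idxOf_lt_length_of_mem hvIA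
    have hgetv : IA[IA.idxOf v] = v := List.getElem_idxOf hidx
    rw [hget]
    have he' : (((IA.idxOf v : Nat) : Int), v) ∈ E := by
      rw [hEdef, pvEnum_mem]
      exact ⟨IA.idxOf v, hidx, by simp [hgetv]⟩
    have := pvRecOf_spec v.1.1 E hEpw (((IA.idxOf v : Nat) : Int), v) he' rfl ?_
    · simpa using this
    · intro e he hc
      obtain ⟨i, hilt, rfl⟩ := (pvEnum_mem IA 0 e).mp (hEdef ▸ he)
      have hwS : IA[i] ∈ S := hSperm.symm.subset (List.getElem_mem hilt)
      rcases hdom IA[i] hwS hc with heq | hrl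
      · left
        have : IA.idxOf v = i := by rw [← heq, hIAnodup.idxOf_getElem i hilt]
        simp [this, heq]
      · rcases hrl with hlt | ⟨heq2, hlt2⟩
        · right; left; exact hlt
        · right; right
          refine ⟨heq2.symm, ?_⟩
          have hidxeq : IA.idxOf IA[i] = i := hIAnodup.idxOf_getElem i hilt
          simp only [] at hlt2
          rw [hidxeq] at hlt2
          push_cast
          omega
  -- key sets agree
  have hbestkeysnodup : best.keys.Nodup := by rw [hbestdef]; exact pvKeys_nodup_best E
  have hFkeysnodup : (F.map (fun v => v.1.1)).Nodup := by rw [hFdef]; exact pvFW_nodup S []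
  have hkeysiff : ∀ n, n ∈ best.keys ↔ n ∈ F.map (fun v => v.1.1) := by
    intro n
    have h1 : n ∈ best.keys ↔ ∃ e ∈ E, e.2.1.1 = n := by
      rw [← not_iff_not, ← pvGet?_none_iff_keys, hget, pvUpd_none_iff]
      push Not
      simp
    rw [h1]
    constructor
    · rintro ⟨e, he, rfl⟩
      obtain ⟨i, hilt, rfl⟩ := (pvEnum_mem IA 0 e).mp (hEdef ▸ he)
      have hwS : IA[i] ∈ S := hSperm.symm.subset (List.getElem_mem hilt)
      obtain ⟨v, hvF, hvn⟩ := pvFW_cover S [] _ (by simp) ⟨IA[i], hwS, rfl⟩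
      exact List.mem_map.mpr ⟨v, hvF, hvn⟩
    · intro hn
      obtain ⟨v, hvF, rfl⟩ := List.mem_map.mp hn
      obtain ⟨hvS, -, -⟩ := pvFW_first S [] hSpair hvF
      have hvIA : v ∈ IA := hSperm.subset hvS
      have hidx := List.idxOf_lt_length_of_mem hvIA
      refine ⟨(((IA.idxOf v : Nat) : Int), v), ?_, rfl⟩
      rw [hEdef, pvEnum_mem]
      exact ⟨IA.idxOf v, hidx, by simp [List.getElem_idxOf hidx]⟩
  -- the target list
  set T := F.map (fun v => (v.1.1, (v.2, v.1.2, ((IA.idxOf v : Nat) : Int)))) with hTdef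
  have hTperm : T.Perm best.items := by
    have hTkeys : T = (F.map (fun v => v.1.1)).map
        (fun n => (n, best.getD n (0, 0, 0))) := by
      rw [hTdef, List.map_map]
      apply List.map_congr_left
      intro v hv
      simp only [Function.comp]
      rw [PySem.Dict.getD, hWin v hv]
      rfl
    have hitemsb : best.items = best.keys.map (fun n => (n, best.getD n (0, 0, 0))) :=
      PySem.Dict.items_eq_map_keys best hbestkeysnodup (0, 0, 0)
    rw [hTkeys, hitemsb]
    apply List.Perm.map
    rw [List.perm_ext_iff_of_nodup hFkeysnodup hbestkeysnodup]
    intro n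
    exact (hkeysiff n).symm
  have hTpair : T.Pairwise (fun a b => pvB2 a b = true) := by
    rw [hTdef, List.pairwise_map]
    apply hFpair.imp
    intro a b hab
    rcases hab with hlt | ⟨heq, hlt⟩
    · simp only [pvB2, Bool.or_eq_true, decide_eq_true_eq]
      left; omega
    · simp only [pvB2, Bool.or_eq_true, Bool.and_eq_true, Bool.not_eq_true',
        decide_eq_true_eq, decide_eq_false_iff_not]
      right
      constructor
      · omega
      · exact_mod_cast hlt
  -- B2 is transitive and asymmetric
  have hB2trans : ∀ a b c : Int × (Int × Int × Int),
      pvB2 a b = true → pvB2 b c = true → pvB2 a c = true := by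
    intro a b c hab hbc
    simp only [pvB2, Bool.or_eq_true, Bool.and_eq_true, Bool.not_eq_true',
      decide_eq_true_eq, decide_eq_false_iff_not] at *
    omega
  have hB2asym : ∀ a b : Int × (Int × Int × Int),
      pvB2 a b = true → pvB2 b a = true → False := by
    intro a b hab hba
    simp only [pvB2, Bool.or_eq_true, Bool.and_eq_true, Bool.not_eq_true',
      decide_eq_true_eq, decide_eq_false_iff_not] at *
    omega
  -- the sort in B produces exactly T
  have hsort2 : PySem.List.sorted2 best.items (fun kv => -kv.2.1) (fun kv => kv.2.2.2) false = T := by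
    have hfold : PySem.List.sorted2 best.items (fun kv => -kv.2.1) (fun kv => kv.2.2.2) false
        = best.items.foldl (fun acc x => PySem.List.insertBy pvB2 x acc) [] := rfl
    have hweak : (PySem.List.sorted2 best.items (fun kv => -kv.2.1) (fun kv => kv.2.2.2)
        false).Pairwise (fun a b => pvB2 b a = false) := by
      rw [hfold]
      exact pvSortWeak pvB2 hB2trans hB2asym best.items [] (by simp)
    have hperm2 : T.Perm (PySem.List.sorted2 best.items (fun kv => -kv.2.1)
        (fun kv => kv.2.2.2) false) :=
      hTperm.trans (PySem.List.sorted2_perm best.items _ _ false).symm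
    exact (pvSortedUnique pvB2 T _ hperm2 hTpair hweak).symm
  -- final dict rebuild
  rw [hA, hBeq, hsort2]
  have hfresh : ∀ a ∈ T, (PySem.Dict.empty : PySem.Dict Int Int).contains a.1 = false :=
    fun a _ => rfl
  have hTnodup : (T.map (fun kv => kv.1)).Nodup := by
    rw [hTdef, List.map_map]
    exact hFkeysnodup
  rw [PySem.Dict.items_foldl_insert_fresh T (fun kv => kv.1) (fun kv => kv.2.2.1)
    PySem.Dict.empty hfresh hTnodup]
  show _ = ([] : List (Int × Int)) ++ T.map (fun kv => (kv.1, kv.2.2.1))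
  rw [List.nil_append, hTdef, List.map_map]
  rfl


-- ===== VERDICT (by name: the statement is the Claim_ definition above) =====
theorem get_rename_dict_py_spec : Claim_equal_get_rename_dict_py := by
  intro old_labels new_labels _
  unfold Spec_get_rename_dict_py
  exact pvMain old_labels new_labels
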